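-- pv_equiv track=rewrite | github.com/dzarmola/cuddly-guacamole_wflow | scripts/my_little_merger.py | go_through_graph
-- ===== SOURCE A (Python) =====
-- def neigh(edges,vert):
--     new = []
--     delete = []
--     for i,e in enumerate(edges):
--         if vert in e:
--             nv = e[1] if e[0]==vert else e[0]
--             new.append(nv)
--             delete.append(i)
--     while delete:
--         edges.pop(delete.pop())
--     return new
--
-- def in_column(column,what):
--     return what[0] in [_[0] for _ in column]
--
-- def bfs(edges,start,column):
--     queue = [start]
--     while queue:
--         cur = queue.pop()
--         column.append(cur)
--         ns = neigh(edges,cur)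
--         for n in ns:
--             if not in_column(column,n) and not in_column(queue,n):
--                 queue.append(n)
--
-- def go_through_graph(edges,starter):
--     columns = []
--     while edges:
--         column = []
--         bfs(edges,starter,column)
-- #        get_all(edges,starter,column)
--         columns.append(column)
--         if edges:
--             starter = edges[0][0]
--     return columns
-- ===== SOURCE B (Python) =====
-- # B: one-pass adjacency lists + a global set of already-popped vertices (an edge is
-- # gone exactly when one of its endpoints has been popped) + a per-component set of
-- # seen x-coordinates + a monotone pointer to the first surviving edge.
-- # Like A, it consumes the caller's edge list in place (A empties it; B clears it at the end).
-- def go_through_graph(edges, starter):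
--     adj = {}
--     for u, v in edges:
--         adj.setdefault(u, []).append(v)
--         if v != u:
--             adj.setdefault(v, []).append(u)
--     popped = set()
--     remaining = len(edges)
--     first = 0
--     columns = []
--     while remaining > 0:
--         column = []
--         seen = {starter[0]}
--         stack = [starter]
--         while stack:
--             cur = stack.pop()
--             column.append(cur)
--             ns = [nb for nb in adj.get(cur, ()) if nb not in popped]
--             popped.add(cur)
--             remaining -= len(ns)
--             for nb in ns:
--                 if nb[0] not in seen:
--                     seen.add(nb[0])
--                     stack.append(nb)
--         columns.append(column)
--         if remaining > 0:
--             while edges[first][0] in popped or edges[first][1] in popped: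
--                 first += 1
--             starter = edges[first][0]
--     del edges[:]
--     return columns
-- ===== Notes on version B (the rewrite author's own statement) =====
-- stated objective: faster
-- what changed: A rescans and rebuilds the whole remaining edge list for every popped vertex and tests queue/column membership by scanning lists; B builds an adjacency map once, marks removed edges implicitly via a set of already-popped vertices, tracks seen x-coordinates in a set, and finds the next component's start edge with a monotone pointer.
import Mathlib
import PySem

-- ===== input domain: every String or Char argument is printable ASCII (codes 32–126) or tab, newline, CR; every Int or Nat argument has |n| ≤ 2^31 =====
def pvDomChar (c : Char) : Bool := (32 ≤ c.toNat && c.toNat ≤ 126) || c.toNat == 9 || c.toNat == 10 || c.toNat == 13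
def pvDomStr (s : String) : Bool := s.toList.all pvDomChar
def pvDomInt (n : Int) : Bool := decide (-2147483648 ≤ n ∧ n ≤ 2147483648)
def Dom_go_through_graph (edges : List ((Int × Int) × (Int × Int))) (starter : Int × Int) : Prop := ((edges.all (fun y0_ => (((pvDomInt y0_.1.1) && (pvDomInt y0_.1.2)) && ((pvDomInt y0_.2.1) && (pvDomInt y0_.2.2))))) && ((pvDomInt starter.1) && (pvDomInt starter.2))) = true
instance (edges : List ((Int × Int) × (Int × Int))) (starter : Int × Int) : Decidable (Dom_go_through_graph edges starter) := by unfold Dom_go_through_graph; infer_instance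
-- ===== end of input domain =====

-- B replaces A's repeated edge-list rescans and list membership tests by a prebuilt
-- adjacency map, a set of already-popped vertices, a seen-x set and a monotone edge
-- pointer; equivalence is about the return value (both Pythons consume `edges` in place).
-- ===== PORT A =====
abbrev pvV : Type := Int × Int
abbrev pvE : Type := pvV × pvV

def pvInc (vert : pvV) (e : pvE) : Bool := e.1 == vert || e.2 == vert
def pvNv (vert : pvV) (e : pvE) : pvV := if e.1 == vert then e.2 else e.1

-- for i, e in enumerate(edges): if vert in e: new.append(...); delete.append(i)
def pvNeighScan (vert : pvV) : List pvE → Nat → List pvV × List Nat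
  | [], _ => ([], [])
  | e :: es, i =>
    let rest := pvNeighScan vert es (i + 1)
    if pvInc vert e then (pvNv vert e :: rest.1, i :: rest.2) else rest

-- while delete: edges.pop(delete.pop())  (list.pop on a valid index = eraseIdx; applied to delete reversed)
def pvPopLoop : List pvE → List Nat → List pvE
  | es, [] => es
  | es, d :: ds => pvPopLoop (es.eraseIdx d) ds

def pvNeigh (edges : List pvE) (vert : pvV) : List pvV × List pvE :=
  let nd := pvNeighScan vert edges 0
  (nd.1, pvPopLoop edges nd.2.reverse)

def pvInColumn (column : List pvV) (what : pvV) : Bool :=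
  (column.map Prod.fst).contains what.1

-- the bfs loop; the dite is ONLY a termination guard (its else branch is never
-- reached: the measure always decreases, see pvBfsA_step_lt below)
def pvBfsA : List pvE → List pvV → List pvV → List pvV × List pvE
  | edges, [], column => (column, edges)
  | edges, q :: qs, column =>
    let cur := (q :: qs).getLast (List.cons_ne_nil q qs)
    let queue := (q :: qs).dropLast
    let column' := column ++ [cur]
    let r := pvNeigh edges cur
    let queue' := r.1.foldl
      (fun qq n => if !pvInColumn column' n && !pvInColumn qq n then qq ++ [n] else qq) queue
    if h : 2 * r.2.length + queue'.length < 2 * edges.length + (q :: qs).length then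
      pvBfsA r.2 queue' column'
    else (column', r.2)
termination_by edges queue _ => 2 * edges.length + queue.length
decreasing_by exact h

-- while edges: bfs; columns.append; starter = edges[0][0]  (dite = termination guard, never false)
def pvGtgLoop : List pvE → List (List pvV) → List (List pvV)
  | [], columns => columns
  | e :: es, columns =>
    let r := pvBfsA (e :: es) [e.1] []
    if h : r.2.length < (e :: es).length then pvGtgLoop r.2 (columns ++ [r.1])
    else columns ++ [r.1]
termination_by edges _ => edges.length
decreasing_by exact h

def go_through_graph (edges : List ((Int × Int) × (Int × Int))) (starter : Int × Int) : List (List (Int × Int)) :=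
  match edges with
  | [] => []
  | _ :: _ =>
    let r := pvBfsA edges [starter] []
    pvGtgLoop r.2 [r.1]

-- ===== PORT B =====
def pvBuildAdj (edges : List pvE) : PySem.Dict pvV (List pvV) :=
  edges.foldl (fun d e =>
    let d1 := d.modify e.1 [] (fun l => l ++ [e.2])   -- adj.setdefault(u, []).append(v)
    if e.2 ≠ e.1 then d1.modify e.2 [] (fun l => l ++ [e.1]) else d1) PySem.Dict.empty

-- for nb in ns: if nb[0] not in seen: seen.add(nb[0]); stack.append(nb)
def pvPushNs : List pvV → PySem.Set Int → List pvV → PySem.Set Int × List pvV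
  | [], seen, stack => (seen, stack)
  | nb :: rest, seen, stack =>
    if !(PySem.Set.contains seen nb.1) then
      pvPushNs rest (PySem.Set.add seen nb.1) (stack ++ [nb])
    else pvPushNs rest seen stack

-- termination measure helpers for the B-side DFS loop
def pvXs (adj : PySem.Dict pvV (List pvV)) : List Int := (adj.values.flatMap id).map Prod.fst
def pvPot (adj : PySem.Dict pvV (List pvV)) (seen : PySem.Set Int) : Nat :=
  (pvXs adj).countP (fun x => !(PySem.Set.contains seen x))

-- the DFS loop of B; the dite is ONLY a termination guard (its else branch is
-- never reached: the measure always decreases, see pvBfsB_guard below)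
def pvBfsB (adj : PySem.Dict pvV (List pvV)) :
    List pvV → PySem.Set pvV → Nat → PySem.Set Int → List pvV → List pvV × PySem.Set pvV × Nat
  | [], popped, rem, _seen, column => (column, popped, rem)
  | s :: ss, popped, rem, seen, column =>
    let cur := (s :: ss).getLast (List.cons_ne_nil s ss)
    let stack := (s :: ss).dropLast
    let column' := column ++ [cur]
    let ns := (adj.getD cur []).filter (fun nb => !(PySem.Set.contains popped nb))
    let popped' := PySem.Set.add popped cur
    let rem' := rem - ns.length
    let p := pvPushNs ns seen stack
    if h : 2 * pvPot adj p.1 + p.2.length < 2 * pvPot adj seen + (s :: ss).length then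
      pvBfsB adj p.2 popped' rem' p.1 column'
    else (column', popped', rem')
termination_by stack _ _ seen _ => 2 * pvPot adj seen + stack.length
decreasing_by exact h

-- while edges[first][0] in popped or edges[first][1] in popped: first += 1
def pvAdvance (edges : List pvE) (popped : PySem.Set pvV) (first : Nat) : Nat :=
  if h : first < edges.length then
    if PySem.Set.contains popped (edges[first].1) || PySem.Set.contains popped (edges[first].2) then
      pvAdvance edges popped (first + 1)
    else first
  else first
termination_by edges.length - first
decreasing_by exact Nat.sub_succ_lt_self edges.length first h

def pvActLen (edges : List pvE) (popped : PySem.Set pvV) : Nat :=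
  (edges.filter (fun e => !(PySem.Set.contains popped e.1) && !(PySem.Set.contains popped e.2))).length

-- the outer component loop of B (dite = termination guard, never false on the
-- states this loop is called with)
def pvGtgLoopB (edges : List pvE) (adj : PySem.Dict pvV (List pvV)) :
    PySem.Set pvV → Nat → Nat → List (List pvV) → List (List pvV)
  | popped, rem, first, columns =>
    let first' := pvAdvance edges popped first
    let starter := (edges.getD first' (((0 : Int), (0 : Int)), ((0 : Int), (0 : Int)))).1
    let b := pvBfsB adj [starter] popped rem (PySem.Set.ofList [starter.1]) []
    let columns' := columns ++ [b.1]
    if b.2.2 = 0 then columns'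
    else if h : pvActLen edges b.2.1 < pvActLen edges popped then
      pvGtgLoopB edges adj b.2.1 b.2.2 first' columns'
    else columns'
termination_by popped _ _ _ => pvActLen edges popped
decreasing_by exact h

def go_through_graph_alt (edges : List ((Int × Int) × (Int × Int))) (starter : Int × Int) : List (List (Int × Int)) :=
  let adj := pvBuildAdj edges
  if edges.length = 0 then []
  else
    let b := pvBfsB adj [starter] PySem.Set.empty edges.length (PySem.Set.ofList [starter.1]) []
    if b.2.2 = 0 then [b.1]
    else pvGtgLoopB edges adj b.2.1 b.2.2 0 [b.1]

-- ===== PRECONDITION & SPEC =====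
def Spec_go_through_graph (edges : List ((Int × Int) × (Int × Int))) (starter : Int × Int) (out : List (List (Int × Int))) : Prop := out = go_through_graph_alt edges starter
instance (edges : List ((Int × Int) × (Int × Int))) (starter : Int × Int) (out : List (List (Int × Int))) : Decidable (Spec_go_through_graph edges starter out) := by unfold Spec_go_through_graph; infer_instance

-- ===== CLAIM (what is proved, stated in full; the proofs are below) =====
def Claim_equal_go_through_graph : Prop := ∀ (edges : List ((Int × Int) × (Int × Int))) (starter : Int × Int), Dom_go_through_graph edges starter → Spec_go_through_graph edges starter (go_through_graph edges starter)

-- ===== LEMMAS AND PROOFS =====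
lemma pvNeighScan_fst (vert : pvV) (es : List pvE) : ∀ i,
    (pvNeighScan vert es i).1 = (es.filter (pvInc vert)).map (pvNv vert) := by
  induction es with
  | nil => intro i; rfl
  | cons e es ih =>
    intro i
    simp only [pvNeighScan, List.filter_cons]
    by_cases h : pvInc vert e = true <;> simp [h, ih]

lemma pvNeighScan_shift (vert : pvV) (es : List pvE) : ∀ i,
    pvNeighScan vert es (i + 1)
      = ((pvNeighScan vert es i).1, (pvNeighScan vert es i).2.map (· + 1)) := by
  induction es with
  | nil => intro i; rfl
  | cons e es ih =>
    intro i
    simp only [pvNeighScan, ih (i + 1)]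
    by_cases h : pvInc vert e = true <;> simp [h, ih i]

lemma pvPopLoop_append (es : List pvE) (ds ds' : List Nat) :
    pvPopLoop es (ds ++ ds') = pvPopLoop (pvPopLoop es ds) ds' := by
  induction ds generalizing es with
  | nil => rfl
  | cons d ds ih => simp [pvPopLoop, ih]

lemma pvPopLoop_map_succ (es : List pvE) (e : pvE) (ds : List Nat) :
    pvPopLoop (e :: es) (ds.map (· + 1)) = e :: pvPopLoop es ds := by
  induction ds generalizing es with
  | nil => rfl
  | cons d ds ih => simp [pvPopLoop, ih]

lemma pvNeigh_spec (edges : List pvE) (vert : pvV) :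
    pvNeigh edges vert
      = ((edges.filter (pvInc vert)).map (pvNv vert),
         edges.filter (fun e => !pvInc vert e)) := by
  have h2 : ∀ es : List pvE, pvPopLoop es ((pvNeighScan vert es 0).2).reverse
      = es.filter (fun e => !pvInc vert e) := by
    intro es
    induction es with
    | nil => rfl
    | cons e es ih =>
      simp only [pvNeighScan, pvNeighScan_shift vert es 0]
      by_cases h : pvInc vert e = true
      · rw [if_pos h]
        simp only [List.reverse_cons, List.map_reverse]
        rw [pvPopLoop_append, ← List.map_reverse, pvPopLoop_map_succ]
        simp [pvPopLoop, ih, List.filter_cons, h]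
      · rw [if_neg h]
        simp only [List.map_reverse]
        rw [← List.map_reverse, pvPopLoop_map_succ]
        simp [ih, List.filter_cons, h]
  unfold pvNeigh
  simp [pvNeighScan_fst, h2]

lemma pvNeigh_len (edges : List pvE) (vert : pvV) :
    (pvNeigh edges vert).1.length + (pvNeigh edges vert).2.length = edges.length := by
  rw [pvNeigh_spec]
  simp only [List.length_map]
  induction edges with
  | nil => rfl
  | cons e es ih =>
    by_cases h : pvInc vert e = true <;> simp [List.filter_cons, h] <;> omega

lemma pvPush_len (col : List pvV) (ns : List pvV) : ∀ qq : List pvV,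
    (ns.foldl (fun qq n => if !pvInColumn col n && !pvInColumn qq n then qq ++ [n] else qq) qq).length
      ≤ qq.length + ns.length := by
  induction ns with
  | nil => intro qq; simp
  | cons n ns ih =>
    intro qq
    simp only [List.foldl_cons]
    by_cases h : (!pvInColumn col n && !pvInColumn qq n) = true
    · simp only [h, if_pos rfl]
      have := ih (qq ++ [n])
      simp at this ⊢; omega
    · simp only [h]
      have := ih qq
      simp at this ⊢; omega


lemma pvBfsA_len : ∀ (edges : List pvE) (queue column : List pvV),
    (pvBfsA edges queue column).2.length ≤ edges.length := by
  intro edges queue column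
  induction edges, queue, column using pvBfsA.induct with
  | case1 edges column => simp [pvBfsA]
  | case2 edges q qs column cur queue column' r queue' h ih =>
    rw [pvBfsA]
    split
    · refine le_trans ih ?_
      have h1 := pvNeigh_len edges cur
      show (pvNeigh edges cur).2.length ≤ edges.length
      omega
    · have h1 := pvNeigh_len edges cur
      show (pvNeigh edges cur).2.length ≤ edges.length
      omega
  | case3 edges q qs column cur queue column' r queue' h =>
    rw [pvBfsA]
    split
    · next hg => exact absurd hg h
    · have h1 := pvNeigh_len edges cur
      show (pvNeigh edges cur).2.length ≤ edges.length
      omega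

lemma pvBfsA_head (e : pvE) (es : List pvE) :
    (pvBfsA (e :: es) [e.1] []).2.length < (e :: es).length := by
  have hb : (pvNeigh (e :: es) (([e.1] : List pvV).getLast (List.cons_ne_nil e.1 []))).2.length
      < (e :: es).length := by
    simp only [List.getLast_singleton]
    rw [pvNeigh_spec]
    have hinc : pvInc e.1 e = true := by simp [pvInc]
    simp only [List.filter_cons, hinc, Bool.not_true, List.length_cons]
    have := List.length_filter_le (fun x => !pvInc e.1 x) es
    simp only [if_neg (by simp : ¬ (false = true))]
    omega
  rw [pvBfsA]
  split
  · exact lt_of_le_of_lt (pvBfsA_len _ _ _) hb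
  · exact hb
lemma pvCountP_lt {α : Type} (l : List α) (p q : α → Bool) (a : α)
    (ha : a ∈ l) (hp : p a = true) (hq : q a = false)
    (hmono : ∀ b, q b = true → p b = true) :
    l.countP q < l.countP p := by
  induction l with
  | nil => cases ha
  | cons x xs ih =>
    simp only [List.countP_cons]
    rcases List.mem_cons.mp ha with h | h
    · subst h
      have h1 := List.countP_mono_left (l := xs) (p := q) (q := p) (fun b _ => hmono b)
      simp [hp, hq]; omega
    · have := ih h
      by_cases hqx : q x = true
      · simp [hqx, hmono x hqx]; omega
      · simp only [Bool.not_eq_true] at hqx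
        simp [hqx]
        by_cases hpx : p x = true <;> simp [hpx] <;> omega

lemma pvContains_decide {α : Type} [BEq α] [LawfulBEq α] (s : PySem.Set α) (y : α) :
    PySem.Set.contains s y = decide (y ∈ s) := by
  cases hc : PySem.Set.contains s y
  · have : ¬ y ∈ s := fun h => by
      have := (PySem.Set.contains_iff (s := s) (x := y)).mpr h
      rw [hc] at this; cases this
    simp [this]
  · have := (PySem.Set.contains_iff (s := s) (x := y)).mp hc
    simp [this]

lemma pvContains_add {α : Type} [BEq α] [LawfulBEq α] [DecidableEq α] (s : PySem.Set α) (x y : α) :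
    PySem.Set.contains (PySem.Set.add s x) y = (PySem.Set.contains s y || decide (y = x)) := by
  rw [pvContains_decide, pvContains_decide]
  by_cases h : y ∈ PySem.Set.add s x
  · rcases (PySem.Set.mem_add s x y).mp h with h' | h' <;> simp [h, h']
  · have h1 : ¬ y ∈ s := fun h' => h ((PySem.Set.mem_add s x y).mpr (Or.inl h'))
    have h2 : ¬ y = x := fun h' => h ((PySem.Set.mem_add s x y).mpr (Or.inr h'))
    simp [h, h1, h2]

lemma pvPot_add_lt (adj : PySem.Dict pvV (List pvV)) (seen : PySem.Set Int) (x : Int)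
    (hx : x ∈ pvXs adj) (hs : PySem.Set.contains seen x = false) :
    pvPot adj (PySem.Set.add seen x) < pvPot adj seen := by
  unfold pvPot
  have hmemx : x ∉ seen := by rw [pvContains_decide] at hs; simpa using hs
  refine pvCountP_lt (pvXs adj) (fun y => !(PySem.Set.contains seen y))
    (fun y => !(PySem.Set.contains (PySem.Set.add seen x) y)) x hx ?_ ?_ ?_
  · simp [pvContains_decide, hmemx]
  · simp [pvContains_add]
  · intro b hb
    simp only [pvContains_add, Bool.not_eq_true', Bool.or_eq_false_iff] at hb
    have hb1 := hb.1
    rw [pvContains_decide] at hb1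
    simpa using hb1

lemma pvPushNs_measure (adj : PySem.Dict pvV (List pvV)) (ns : List pvV) :
    ∀ (seen : PySem.Set Int) (stack : List pvV),
    (∀ nb ∈ ns, nb.1 ∈ pvXs adj) →
    2 * pvPot adj (pvPushNs ns seen stack).1 + (pvPushNs ns seen stack).2.length
      ≤ 2 * pvPot adj seen + stack.length := by
  induction ns with
  | nil => intro seen stack _; simp [pvPushNs]
  | cons nb rest ih =>
    intro seen stack hmem
    rw [pvPushNs]
    by_cases h : PySem.Set.contains seen nb.1 = false
    · simp only [h, Bool.not_false, if_pos]
      have h1 := ih (PySem.Set.add seen nb.1) (stack ++ [nb]) (fun b hb => hmem b (List.mem_cons_of_mem _ hb))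
      have h2 := pvPot_add_lt adj seen nb.1 (hmem nb (List.mem_cons_self)) h
      simp only [List.length_append, List.length_cons, List.length_nil] at h1 ⊢
      omega
    · simp only [Bool.not_eq_false] at h
      simp only [h, Bool.not_true, Bool.false_eq_true, if_neg, not_false_iff]
      exact ih seen stack (fun b hb => hmem b (List.mem_cons_of_mem _ hb))

lemma pvMem_xs_of_getD (adj : PySem.Dict pvV (List pvV)) (cur : pvV) (nb : pvV)
    (h : nb ∈ adj.getD cur []) : nb.1 ∈ pvXs adj := by
  cases hg : adj.get? cur with
  | none =>
    rw [PySem.Dict.getD_eq_get?_getD, hg] at h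
    cases h
  | some l =>
    rw [PySem.Dict.getD_eq_get?_getD, hg] at h
    have hit := PySem.Dict.mem_items_of_get?_eq_some adj hg
    have hv : l ∈ adj.values := by
      simp only [PySem.Dict.values]
      exact List.mem_map.mpr ⟨(cur, l), hit, rfl⟩
    simp only [pvXs]
    exact List.mem_map.mpr ⟨nb, List.mem_flatMap.mpr ⟨l, hv, h⟩, rfl⟩

-- ===== equivalence proof helpers =====
def pvAct (popped : PySem.Set pvV) (edges : List pvE) : List pvE :=
  edges.filter (fun e => !(PySem.Set.contains popped e.1) && !(PySem.Set.contains popped e.2))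

lemma pvActLen_eq (edges : List pvE) (popped : PySem.Set pvV) :
    pvActLen edges popped = (pvAct popped edges).length := rfl

def pvEntries (cur : pvV) (e : pvE) : List pvV :=
  if e.1 = cur then [e.2] else if e.2 = cur then [e.1] else []

lemma pvBuildAdj_getD (E0 : List pvE) (cur : pvV) :
    (pvBuildAdj E0).getD cur [] = E0.flatMap (pvEntries cur) := by
  suffices h : ∀ (l : List pvE) (d : PySem.Dict pvV (List pvV)),
      (l.foldl (fun d e =>
        let d1 := d.modify e.1 [] (fun l => l ++ [e.2])
        if e.2 ≠ e.1 then d1.modify e.2 [] (fun l => l ++ [e.1]) else d1) d).getD cur []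
      = d.getD cur [] ++ l.flatMap (pvEntries cur) by
    have h2 := h E0 PySem.Dict.empty
    simpa [pvBuildAdj, PySem.Dict.getD_empty] using h2
  intro l
  induction l with
  | nil => intro d; simp
  | cons e es ih =>
    intro d
    simp only [List.foldl_cons, List.flatMap_cons, ih, ← List.append_assoc]
    congr 1
    show ((let d1 := d.modify e.1 [] (fun l => l ++ [e.2])
        if e.2 ≠ e.1 then d1.modify e.2 [] (fun l => l ++ [e.1]) else d1)).getD cur []
      = d.getD cur [] ++ pvEntries cur e
    by_cases h21 : e.2 = e.1
    · rw [if_neg (by simp [h21])]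
      rw [PySem.Dict.getD_modify]
      unfold pvEntries
      by_cases hc : e.1 = cur
      · subst hc; simp [h21]
      · have h2 : ¬ (e.2 = cur) := by rw [h21]; exact hc
        simp [hc, h2, Ne.symm hc]
    · rw [if_pos h21]
      rw [PySem.Dict.getD_modify, PySem.Dict.getD_modify]
      unfold pvEntries
      by_cases hc1 : e.1 = cur
      · subst hc1
        simp [h21, Ne.symm h21]
      · by_cases hc2 : e.2 = cur
        · subst hc2
          simp [hc1, Ne.symm hc1, h21]
        · simp [PySem.Dict.getD_modify, hc1, hc2, Ne.symm hc1, Ne.symm hc2]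

def pvActP (popped : PySem.Set pvV) (e : pvE) : Bool :=
  !decide (e.1 ∈ (popped : List pvV)) && !decide (e.2 ∈ (popped : List pvV))

lemma pvAct_eq_filter (popped : PySem.Set pvV) (E0 : List pvE) :
    pvAct popped E0 = E0.filter (pvActP popped) := by
  unfold pvAct pvActP
  apply List.filter_congr
  intro e _
  rw [pvContains_decide, pvContains_decide]

lemma pvNsFilter_eq (popped : PySem.Set pvV) (l : List pvV) :
    l.filter (fun nb => !(PySem.Set.contains popped nb))
      = l.filter (fun nb => !decide (nb ∈ (popped : List pvV))) := by
  apply List.filter_congr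
  intro nb _
  rw [pvContains_decide]

lemma pvNs_eq (E0 : List pvE) (popped : PySem.Set pvV) (cur : pvV)
    (hcur : cur ∉ (popped : List pvV)) :
    (E0.flatMap (pvEntries cur)).filter (fun nb => !(PySem.Set.contains popped nb))
      = ((pvAct popped E0).filter (pvInc cur)).map (pvNv cur) := by
  rw [pvNsFilter_eq, pvAct_eq_filter]
  induction E0 with
  | nil => rfl
  | cons e es ih =>
    rw [List.flatMap_cons, List.filter_append, ih, List.filter_cons]
    by_cases ha : pvActP popped e = true
    · rw [if_pos ha, List.filter_cons]
      unfold pvActP at ha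
      simp only [Bool.and_eq_true, Bool.not_eq_true', decide_eq_false_iff_not] at ha
      by_cases h1 : e.1 = cur
      · have hinc : pvInc cur e = true := by simp [pvInc, h1]
        rw [if_pos hinc, List.map_cons]
        have : pvEntries cur e = [e.2] := by unfold pvEntries; rw [if_pos h1]
        rw [this]
        have : pvNv cur e = e.2 := by unfold pvNv; rw [if_pos (by simp [h1])]
        rw [this]
        simp [List.filter_cons, ha.2]
      · by_cases h2 : e.2 = cur
        · have hinc : pvInc cur e = true := by simp [pvInc, h2]
          rw [if_pos hinc, List.map_cons]
          have he : pvEntries cur e = [e.1] := by unfold pvEntries; rw [if_neg h1, if_pos h2]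
          rw [he]
          have : pvNv cur e = e.1 := by unfold pvNv; rw [if_neg (by simp [h1])]
          rw [this]
          simp [List.filter_cons, ha.1]
        · have hinc : ¬ (pvInc cur e = true) := by simp [pvInc, h1, h2]
          rw [if_neg hinc]
          have he : pvEntries cur e = [] := by unfold pvEntries; rw [if_neg h1, if_neg h2]
          rw [he]
          rfl
    · rw [if_neg ha]
      unfold pvActP at ha
      simp only [Bool.and_eq_true, Bool.not_eq_true', decide_eq_false_iff_not, not_and_or,
        not_not] at ha
      have he : (pvEntries cur e).filter (fun nb => !decide (nb ∈ (popped : List pvV))) = [] := by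
        unfold pvEntries
        by_cases h1 : e.1 = cur
        · rcases ha with h | h
          · exact absurd (h1 ▸ h) hcur
          · rw [if_pos h1]; simp [h]
        · by_cases h2 : e.2 = cur
          · rcases ha with h | h
            · rw [if_neg h1, if_pos h2]; simp [h]
            · exact absurd (h2 ▸ h) hcur
          · rw [if_neg h1, if_neg h2]; rfl
      rw [he]
      rfl

lemma pvAct_add (E0 : List pvE) (popped : PySem.Set pvV) (cur : pvV) :
    pvAct (PySem.Set.add popped cur) E0 = (pvAct popped E0).filter (fun e => !pvInc cur e) := by
  unfold pvAct
  rw [List.filter_filter]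
  apply List.filter_congr
  intro e _
  rw [pvContains_add, pvContains_add]
  cases hx : PySem.Set.contains popped e.1 <;> cases hy : PySem.Set.contains popped e.2 <;>
    by_cases hu : e.1 = cur <;> by_cases hv : e.2 = cur <;> simp [pvInc, hu, hv]

lemma pvInColumn_eq (c : List pvV) (w : pvV) :
    pvInColumn c w = decide (w.1 ∈ c.map Prod.fst) := by
  unfold pvInColumn; simp

lemma pvPush_sim (col : List pvV) (ns : List pvV) :
    ∀ (seen : PySem.Set Int) (stack : List pvV),
    (∀ x : Int, PySem.Set.contains seen x = true ↔ (x ∈ col.map Prod.fst ∨ x ∈ stack.map Prod.fst)) →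
    (pvPushNs ns seen stack).2
        = ns.foldl (fun qq n => if !pvInColumn col n && !pvInColumn qq n then qq ++ [n] else qq) stack
    ∧ (∀ x : Int, PySem.Set.contains (pvPushNs ns seen stack).1 x = true ↔
        (x ∈ col.map Prod.fst ∨ x ∈ (pvPushNs ns seen stack).2.map Prod.fst))
    ∧ ((stack.map Prod.fst).Nodup → ((pvPushNs ns seen stack).2.map Prod.fst).Nodup)
    ∧ (∀ n ∈ (pvPushNs ns seen stack).2, n ∈ stack ∨ (n ∈ ns ∧ n.1 ∉ col.map Prod.fst)) := by
  induction ns with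
  | nil =>
    intro seen stack hseen
    refine ⟨rfl, hseen, fun h => h, fun n hn => Or.inl hn⟩
  | cons nb rest ih =>
    intro seen stack hseen
    rw [pvPushNs, List.foldl_cons]
    by_cases hmem : PySem.Set.contains seen nb.1 = true
    · -- not pushed on the B side; A-side condition is false as well
      have hA : (!pvInColumn col nb && !pvInColumn stack nb) = false := by
        rcases (hseen nb.1).mp hmem with h | h
        · rw [pvInColumn_eq]; simp [h]
        · rw [pvInColumn_eq stack]; simp [h]
      rw [hA]
      simp only [hmem, Bool.not_true, Bool.false_eq_true, if_neg, not_false_iff]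
      obtain ⟨e1, e2, e3, e4⟩ := ih seen stack hseen
      exact ⟨e1, e2, e3, fun n hn => (e4 n hn).elim Or.inl
        (fun h => Or.inr ⟨List.mem_cons_of_mem _ h.1, h.2⟩)⟩
    · -- pushed on both sides
      have hx := hmem
      rw [Bool.not_eq_true] at hx
      have hnotcol : nb.1 ∉ col.map Prod.fst := fun h => hmem ((hseen nb.1).mpr (Or.inl h))
      have hnotstack : nb.1 ∉ stack.map Prod.fst := fun h => hmem ((hseen nb.1).mpr (Or.inr h))
      have hA : (!pvInColumn col nb && !pvInColumn stack nb) = true := by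
        rw [pvInColumn_eq, pvInColumn_eq]; simp [hnotcol, hnotstack]
      rw [hA]
      simp only [hx, Bool.not_false, if_pos]
      have hseen' : ∀ x : Int, PySem.Set.contains (PySem.Set.add seen nb.1) x = true ↔
          (x ∈ col.map Prod.fst ∨ x ∈ (stack ++ [nb]).map Prod.fst) := by
        intro x
        rw [pvContains_add]
        simp only [Bool.or_eq_true, decide_eq_true_eq, List.map_append, List.mem_append,
          List.map_cons, List.map_nil, List.mem_singleton]
        constructor
        · rintro (h | h)
          · rcases (hseen x).mp h with h' | h'
            · exact Or.inl h'
            · exact Or.inr (Or.inl h')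
          · exact Or.inr (Or.inr h)
        · rintro (h | h | h)
          · exact Or.inl ((hseen x).mpr (Or.inl h))
          · exact Or.inl ((hseen x).mpr (Or.inr h))
          · exact Or.inr h
      obtain ⟨e1, e2, e3, e4⟩ := ih (PySem.Set.add seen nb.1) (stack ++ [nb]) hseen'
      refine ⟨e1, e2, ?_, ?_⟩
      · intro hnd
        apply e3
        rw [List.map_append]
        rw [List.nodup_append]
        refine ⟨hnd, by simp, ?_⟩
        intro a ha b hb hab
        simp only [List.map_cons, List.map_nil, List.mem_singleton] at hb
        subst hb; subst hab; exact hnotstack ha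
      · intro n hn
        rcases e4 n hn with h | h
        · rcases List.mem_append.mp h with h' | h'
          · exact Or.inl h'
          · simp only [List.mem_singleton] at h'
            subst h'
            exact Or.inr ⟨List.mem_cons_self, hnotcol⟩
        · exact Or.inr ⟨List.mem_cons_of_mem _ h.1, h.2⟩

lemma pvBfs_sim (E0 : List pvE) :
    ∀ (queue : List pvV) (popped : PySem.Set pvV) (rem : Nat) (seen : PySem.Set Int)
      (column : List pvV),
    (∀ n ∈ queue, n ∉ (popped : List pvV)) →
    ((queue.map Prod.fst).Nodup) →
    (∀ x : Int, PySem.Set.contains seen x = true ↔ (x ∈ column.map Prod.fst ∨ x ∈ queue.map Prod.fst)) →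
    (pvBfsB (pvBuildAdj E0) queue popped rem seen column).1
        = (pvBfsA (pvAct popped E0) queue column).1
    ∧ pvAct ((pvBfsB (pvBuildAdj E0) queue popped rem seen column).2.1) E0
        = (pvBfsA (pvAct popped E0) queue column).2
    ∧ ((popped : List pvV) ⊆ ((pvBfsB (pvBuildAdj E0) queue popped rem seen column).2.1 : List pvV))
    ∧ (rem = (pvAct popped E0).length →
        (pvBfsB (pvBuildAdj E0) queue popped rem seen column).2.2
          = (pvBfsA (pvAct popped E0) queue column).2.length) := by
  intro queue popped rem seen column
  induction queue, popped, rem, seen, column using pvBfsB.induct (adj := pvBuildAdj E0) with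
  | case1 popped rem seen column =>
    intro _ _ _
    rw [pvBfsB, pvBfsA]
    exact ⟨rfl, rfl, fun a ha => ha, fun h => by rw [h]⟩
  | case2 s ss popped rem seen column cur stack column' ns popped' rem' p h ih =>
    intro hI1 hI2 hI3
    -- basic decompositions
    have hq : stack ++ [cur] = s :: ss := by
      simpa [stack, cur] using List.dropLast_concat_getLast (l := s :: ss) (by simp)
    have hcur_mem : cur ∈ s :: ss := by
      rw [← hq]; simp
    have hcur_nin : cur ∉ (popped : List pvV) := hI1 cur hcur_mem
    have hqf : stack.map Prod.fst ++ [cur.1] = (s :: ss).map Prod.fst := by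
      rw [← hq]; simp
    have hnds : (stack.map Prod.fst).Nodup ∧ cur.1 ∉ stack.map Prod.fst := by
      have := hI2
      rw [← hqf, List.nodup_append] at this
      exact ⟨this.1, fun h => this.2.2 cur.1 h cur.1 (by simp) rfl⟩
    -- the collected neighbour list is A's `neigh` output on the active edges
    have hns : ns = (pvNeigh (pvAct popped E0) cur).1 := by
      show ((pvBuildAdj E0).getD cur []).filter (fun nb => !(PySem.Set.contains popped nb)) = _
      rw [pvBuildAdj_getD, pvNs_eq E0 popped cur hcur_nin, pvNeigh_spec]
    -- the new popped set corresponds to A's remaining edges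
    have hact : pvAct popped' E0 = (pvNeigh (pvAct popped E0) cur).2 := by
      show pvAct (PySem.Set.add popped cur) E0 = _
      rw [pvAct_add, pvNeigh_spec]
    -- seen-set invariant transported to (column', stack)
    have hseen' : ∀ x : Int, PySem.Set.contains seen x = true ↔
        (x ∈ column'.map Prod.fst ∨ x ∈ stack.map Prod.fst) := by
      intro x
      rw [hI3 x]
      have hc' : column'.map Prod.fst = column.map Prod.fst ++ [cur.1] := by
        simp [column']
      rw [hc', ← hqf]
      simp only [List.mem_append, List.mem_singleton]
      tauto
    obtain ⟨e1, e2, e3, e4⟩ := pvPush_sim column' ns seen stack hseen'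
    have hns_nin : ∀ n ∈ ns, n ∉ (popped : List pvV) := by
      intro n hn
      simp only [ns] at hn
      have h2 := (List.mem_filter.mp hn).2
      rw [pvContains_decide] at h2
      simpa using h2
    have hI1' : ∀ n ∈ p.2, n ∉ (popped' : List pvV) := by
      intro n hn hmem
      have hcases := e4 n hn
      rcases (PySem.Set.mem_add popped cur n).mp hmem with h | h
      · rcases hcases with h' | h'
        · exact hI1 n (by rw [← hq]; exact List.mem_append.mpr (Or.inl h')) h
        · exact hns_nin n h'.1 h
      · subst h
        rcases hcases with h' | h'
        · exact hnds.2 (List.mem_map.mpr ⟨cur, h', rfl⟩)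
        · exact h'.2 (by simp [column'])
    have hI2' : (p.2.map Prod.fst).Nodup := e3 hnds.1
    obtain ⟨r1, r2, r3, r4⟩ := ih hI1' hI2' e2
    -- one unfolding step of each loop
    have hBstep : pvBfsB (pvBuildAdj E0) (s :: ss) popped rem seen column
        = pvBfsB (pvBuildAdj E0) p.2 popped' rem' p.1 column' := by
      rw [pvBfsB]
      split
      · rfl
      · next hg => exact absurd h hg
    have hAstep : pvBfsA (pvAct popped E0) (s :: ss) column
        = pvBfsA (pvAct popped' E0) p.2 column' := by
      rw [pvBfsA]
      split
      · rw [e1, hns, hact]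
      · next hg =>
        exfalso
        apply hg
        have h1 := pvNeigh_len (pvAct popped E0) ((s :: ss).getLast (List.cons_ne_nil s ss))
        have h2 := pvPush_len (column ++ [(s :: ss).getLast (List.cons_ne_nil s ss)])
          ((pvNeigh (pvAct popped E0) ((s :: ss).getLast (List.cons_ne_nil s ss))).1)
          ((s :: ss).dropLast)
        simp only [List.length_dropLast, List.length_cons] at h2 ⊢
        omega
    rw [hBstep, hAstep]
    refine ⟨r1, r2, ?_, ?_⟩
    · intro a ha
      exact r3 ((PySem.Set.mem_add popped cur a).mpr (Or.inl ha))
    · intro hrem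
      have hlen := pvNeigh_len (pvAct popped E0) cur
      have hr2len : (pvAct popped' E0).length = (pvNeigh (pvAct popped E0) cur).2.length := by
        rw [hact]
      have hnslen : ns.length = (pvNeigh (pvAct popped E0) cur).1.length := by
        rw [hns]
      have hrem' : rem' = (pvAct popped' E0).length := by
        show rem - ns.length = _
        omega
      exact r4 hrem'
  | case3 s ss popped rem seen column cur stack ns p h =>
    intro hI1 hI2 hI3
    refine absurd ?_ h
    have hmem : ∀ nb ∈ ns, nb.1 ∈ pvXs (pvBuildAdj E0) := by
      intro nb hb
      exact pvMem_xs_of_getD (pvBuildAdj E0) cur nb (List.mem_of_mem_filter hb)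
    have h1 := pvPushNs_measure (pvBuildAdj E0) ns seen stack hmem
    have h2 : stack.length = ss.length := by simp [stack]
    simp only [cur, stack, ns, p] at h1 h2 ⊢
    simp only [List.length_cons]
    omega

lemma pvFilter_head (p : pvE → Bool) (l : List pvE) :
    ∀ (k : Nat) (hk : k < l.length),
    (∀ j, j < k → ∀ (hj : j < l.length), p (l[j]'hj) = false) →
    p (l[k]'hk) = true →
    (l.filter p).head? = some (l[k]'hk) := by
  induction l with
  | nil => intro k hk; simp at hk
  | cons x xs ih =>
    intro k hk hpre hhit
    cases k with
    | zero =>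
      simp only [List.getElem_cons_zero] at hhit ⊢
      rw [List.filter_cons, if_pos hhit]
      rfl
    | succ k =>
      have hx : p x = false := by
        have := hpre 0 (Nat.succ_pos k) (by simp)
        simpa using this
      rw [List.filter_cons, if_neg (by simp [hx])]
      simp only [List.getElem_cons_succ] at hhit ⊢
      exact ih k (by simpa using hk)
        (fun j hj hj2 => by
          have := hpre (j + 1) (by omega) (by simpa using Nat.succ_lt_succ hj2)
          simpa using this) hhit

lemma pvFilter_nil (p : pvE → Bool) (l : List pvE)
    (h : ∀ j, ∀ (hj : j < l.length), p (l[j]'hj) = false) : l.filter p = [] := by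
  rw [List.filter_eq_nil_iff]
  intro a ha
  obtain ⟨j, hj, rfl⟩ := List.mem_iff_getElem.mp ha
  simp [h j hj]

lemma pvAdvance_spec (E0 : List pvE) (popped : PySem.Set pvV) :
    ∀ (first : Nat),
    (∀ j, j < first → ∀ (hj : j < E0.length), pvActP popped (E0[j]'hj) = false) →
    pvAct popped E0 ≠ [] →
    ∃ hlt : pvAdvance E0 popped first < E0.length,
      pvActP popped (E0[pvAdvance E0 popped first]'hlt) = true
      ∧ (pvAct popped E0).head? = some (E0[pvAdvance E0 popped first]'hlt)
      ∧ (∀ j, j < pvAdvance E0 popped first → ∀ (hj : j < E0.length), pvActP popped (E0[j]'hj) = false) := by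
  intro first
  induction first using pvAdvance.induct (edges := E0) (popped := popped) with
  | case1 first hfl hcond ih =>
    intro hpre hne
    rw [pvAdvance, dif_pos hfl, if_pos hcond]
    refine ih ?_ hne
    intro j hj hj2
    rcases Nat.lt_or_ge j first with h | h
    · exact hpre j h hj2
    · have hj1 : j = first := by omega
      subst hj1
      unfold pvActP
      rw [pvContains_decide, pvContains_decide] at hcond
      rcases Bool.or_eq_true_iff.mp hcond with h' | h' <;> simp_all
  | case2 first hfl hcond =>
    intro hpre hne
    rw [pvAdvance, dif_pos hfl, if_neg hcond]
    have hhit : pvActP popped (E0[first]'hfl) = true := by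
      unfold pvActP
      rw [pvContains_decide, pvContains_decide] at hcond
      simp only [Bool.or_eq_true_iff, not_or] at hcond
      simp_all
    refine ⟨hfl, hhit, ?_, hpre⟩
    rw [pvAct_eq_filter]
    exact pvFilter_head (pvActP popped) E0 first hfl hpre hhit
  | case3 first hfl =>
    intro hpre hne
    exfalso
    apply hne
    rw [pvAct_eq_filter]
    exact pvFilter_nil _ _ (fun j hj => hpre j (by omega) hj)

lemma pvActP_mono (popped q : PySem.Set pvV) (e : pvE)
    (hsub : (popped : List pvV) ⊆ (q : List pvV))
    (h : pvActP popped e = false) : pvActP q e = false := by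
  unfold pvActP at *
  simp only [Bool.and_eq_false_iff, Bool.not_eq_false', decide_eq_true_eq] at h ⊢
  rcases h with h | h
  · exact Or.inl (hsub h)
  · exact Or.inr (hsub h)

lemma pvSeen_init (v : pvV) : ∀ x : Int,
    PySem.Set.contains (PySem.Set.ofList [v.1]) x = true ↔
      (x ∈ ([] : List pvV).map Prod.fst ∨ x ∈ [v].map Prod.fst) := by
  intro x
  rw [pvContains_decide]
  simp [PySem.Set.mem_ofList]

lemma pvActive_head_notin (popped : PySem.Set pvV) (e : pvE) (h : pvActP popped e = true) :
    e.1 ∉ (popped : List pvV) := by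
  unfold pvActP at h
  simp only [Bool.and_eq_true, Bool.not_eq_true', decide_eq_false_iff_not] at h
  exact h.1

lemma pvOuter_sim (E0 : List pvE) :
    ∀ (N : Nat) (popped : PySem.Set pvV) (rem first : Nat) (columns : List (List pvV)),
    (pvAct popped E0).length ≤ N →
    pvAct popped E0 ≠ [] →
    rem = (pvAct popped E0).length →
    (∀ j, j < first → ∀ (hj : j < E0.length), pvActP popped (E0[j]'hj) = false) →
    pvGtgLoopB E0 (pvBuildAdj E0) popped rem first columns
      = pvGtgLoop (pvAct popped E0) columns := by
  intro N
  induction N with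
  | zero =>
    intro popped rem first columns hN hne _ _
    exact absurd (List.eq_nil_of_length_eq_zero (Nat.le_zero.mp hN)) hne
  | succ N ihN =>
    intro popped rem first columns hN hne hrem hpre
    obtain ⟨hlt, hhit, hhead, hpre'⟩ := pvAdvance_spec E0 popped first hpre hne
    cases hAct : pvAct popped E0 with
    | nil => exact absurd hAct hne
    | cons e es =>
      have he : E0[pvAdvance E0 popped first]'hlt = e := by
        rw [hAct] at hhead
        simpa using hhead.symm
      have hstarter : (E0.getD (pvAdvance E0 popped first)
          (((0 : Int), (0 : Int)), ((0 : Int), (0 : Int)))) = e := by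
        rw [List.getD_eq_getElem E0 _ hlt, he]
      rw [pvGtgLoopB, hstarter]
      have hI1 : ∀ n ∈ [e.1], n ∉ (popped : List pvV) := by
        intro n hn
        simp only [List.mem_singleton] at hn
        subst hn
        exact pvActive_head_notin popped e (he ▸ hhit)
      obtain ⟨r1, r2, r3, r4⟩ := pvBfs_sim E0 [e.1] popped rem (PySem.Set.ofList [e.1.1])
        [] hI1 (by simp) (pvSeen_init e.1)
      rw [hAct] at r1 r2 r4
      have hr4 := r4 (by rw [hrem, hAct])
      rw [pvGtgLoop, dif_pos (pvBfsA_head e es)]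
      by_cases hz : (pvBfsB (pvBuildAdj E0) [e.1] popped rem (PySem.Set.ofList [e.1.1]) []).2.2 = 0
      · rw [if_pos hz]
        have hlen0 : (pvBfsA (e :: es) [e.1] []).2.length = 0 := by omega
        rw [List.length_eq_zero_iff] at hlen0
        rw [hlen0, pvGtgLoop, r1]
      · rw [if_neg hz]
        have hguard : pvActLen E0 (pvBfsB (pvBuildAdj E0) [e.1] popped rem
            (PySem.Set.ofList [e.1.1]) []).2.1 < pvActLen E0 popped := by
          rw [pvActLen_eq, pvActLen_eq, r2, hAct]
          exact pvBfsA_head e es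
        rw [dif_pos hguard]
        have hne' : (pvBfsA (e :: es) [e.1] []).2 ≠ [] := by
          intro h
          rw [h] at hr4
          simp at hr4
          exact hz hr4
        rw [ihN _ _ _ _ (by rw [r2]; have hh := pvBfsA_head e es; rw [hAct] at hN; simp only [List.length_cons] at hN hh; omega)
          (by rw [r2]; exact hne') (by rw [r2]; exact hr4)
          (fun j hj hj2 => pvActP_mono popped _ _ r3 (hpre' j hj hj2))]
        rw [r2, r1]

lemma pvAct_empty (E0 : List pvE) : pvAct PySem.Set.empty E0 = E0 := by
  rw [pvAct_eq_filter]
  apply List.filter_eq_self.mpr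
  intro a _
  unfold pvActP
  simp [PySem.Set.empty]

lemma pvTop (edges : List pvE) (starter : pvV) :
    go_through_graph edges starter = go_through_graph_alt edges starter := by
  cases edges with
  | nil => rfl
  | cons e es =>
    simp only [go_through_graph, go_through_graph_alt]
    rw [if_neg (by simp)]
    have hI1 : ∀ n ∈ [starter], n ∉ (PySem.Set.empty : List pvV) := by
      simp [PySem.Set.empty]
    obtain ⟨r1, r2, r3, r4⟩ := pvBfs_sim (e :: es) [starter] PySem.Set.empty (e :: es).length
      (PySem.Set.ofList [starter.1]) [] hI1 (by simp) (pvSeen_init starter)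
    rw [pvAct_empty] at r1 r2 r4
    have hr4 := r4 rfl
    by_cases hz : (pvBfsB (pvBuildAdj (e :: es)) [starter] PySem.Set.empty (e :: es).length
        (PySem.Set.ofList [starter.1]) []).2.2 = 0
    · rw [if_pos hz]
      have hlen0 : (pvBfsA (e :: es) [starter] []).2.length = 0 := by omega
      rw [List.length_eq_zero_iff] at hlen0
      rw [hlen0, pvGtgLoop, r1]
    · rw [if_neg hz]
      rw [pvOuter_sim (e :: es) (pvAct (pvBfsB (pvBuildAdj (e :: es)) [starter] PySem.Set.empty
            (e :: es).length (PySem.Set.ofList [starter.1]) []).2.1 (e :: es)).length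
          _ _ _ _ (le_refl _)
          (by rw [r2]; intro h; rw [h] at hr4; simp at hr4; exact hz hr4)
          (by rw [r2]; exact hr4)
          (fun j hj hj2 => by omega)]
      rw [r2, r1]

-- ===== VERDICT (by name: the statement is the Claim_ definition above) =====
theorem go_through_graph_spec : Claim_equal_go_through_graph := by
  intro edges starter _
  unfold Spec_go_through_graph
  exact pvTop edges starter
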